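-- pv_equiv track=rewrite | github.com/johncolvin-og/market_data_analysis | src/src/core/iter_utils.py | fmt_iterable
-- ===== SOURCE A (Python) =====
-- class HasNextIter(object):
--     """An iterator wrapper that provides a 'has_next' fn"""
--     def __init__(self, it):
--         self.__it = iter(it)
--         self.__has_next = None
--
--     def __iter__(self):
--         return self
--
--     def next(self):
--         if self.__has_next:
--             result = self.__next
--         else:
--             result = next(self.__it)
--         self.__has_next = None
--         return result
--
--     def has_next(self):
--         if self.__has_next is None:
--             try:
--                 self.__next = next(self.__it)
--             except StopIteration:
--                 self.__has_next = False
--         else: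
--             self.__has_next = True
--         return self.__has_next
--
-- def fmt_iterable(
--         iterable, separator=', ', max_explicit_items=4, if_none='None'):
--     if iterable is None:
--         return if_none
--     if hasattr(iterable, '__len__'):
--         sz = len(iterable)
--         if sz <= max_explicit_items:
--             return separator.join(iterable)
--         rv = separator.join(
--             map(lambda x: str(x), iterable[0:max_explicit_items]))
--         rv += f'{separator}and {sz - max_explicit_items} others'
--         return rv
--
--     expl = []
--     it = HasNextIter(iter(iterable))
--     while len(expl) < max_explicit_items and it.has_next():
--         expl.append(it.next())
--     if it.has_next():
--         expl.append('...')
--     return separator.join(expl)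
-- ===== SOURCE B (Python) =====
-- def fmt_iterable(
--         iterable, separator=', ', max_explicit_items=4, if_none='None'):
--     if iterable is None:
--         return if_none
--     items = list(iterable)
--     hidden = len(items) - max_explicit_items
--     if hidden > 0:
--         items = items[:max_explicit_items] + ['and %d others' % hidden]
--     return separator.join(items)
-- ===== Notes on version B (the rewrite author's own statement) =====
-- stated objective: simpler
-- what changed: B builds a single parts list (the shown prefix plus one 'and N others' cell when items are hidden) and does one separator.join, instead of A's three-way branch with a custom peeking-iterator class, a map(str,...) join and string concatenation of the suffix.
-- intended difference: When the shown prefix is empty (max_explicit_items = 0 with a nonempty list, or max_explicit_items < 0 with len(items) <= -max_explicit_items) and the separator is nonempty, A returns the suffix with a spurious leading separator (e.g. ', and 1 others') because it unconditionally concatenates separator before the suffix; B returns just 'and N others', which is the intended summary. — e.g. on fmt_iterable(some ["a"], ", ", 0, "None"): A returns ", and 1 others", B returns "and 1 others"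
import Mathlib
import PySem

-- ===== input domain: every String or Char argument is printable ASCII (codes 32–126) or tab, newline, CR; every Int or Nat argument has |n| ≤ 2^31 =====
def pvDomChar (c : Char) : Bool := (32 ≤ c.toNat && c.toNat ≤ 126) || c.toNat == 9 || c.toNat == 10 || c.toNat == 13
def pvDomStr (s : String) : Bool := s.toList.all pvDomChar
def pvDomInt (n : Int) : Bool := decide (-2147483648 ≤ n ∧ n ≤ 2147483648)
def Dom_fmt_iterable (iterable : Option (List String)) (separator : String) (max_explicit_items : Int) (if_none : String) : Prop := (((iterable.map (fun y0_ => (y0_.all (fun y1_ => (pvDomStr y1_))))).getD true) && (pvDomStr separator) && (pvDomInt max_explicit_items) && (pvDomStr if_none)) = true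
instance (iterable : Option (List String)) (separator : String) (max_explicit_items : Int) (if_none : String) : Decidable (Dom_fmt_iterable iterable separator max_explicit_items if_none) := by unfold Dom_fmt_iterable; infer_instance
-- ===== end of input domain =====

-- B formats the summary as one separator.join of a parts list (prefix + optional 'and N others' cell)
-- instead of A's branch with a peeking iterator and string concatenation; on the degenerate corner
-- where the shown prefix is empty A emits a spurious leading separator and B does not (see D_ below).
-- Equivalence is about the RETURN value only (neither mutates its arguments).

-- ===== PORT A =====
-- For the argument type Option (List String), `iterable` always has __len__, so the lazy
-- HasNextIter branch of A is unreachable and only the sized branch is ported.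
def fmt_iterable (iterable : Option (List String)) (separator : String) (max_explicit_items : Int) (if_none : String) : String :=
  match iterable with
  | none => if_none
  | some xs =>
      let sz : Int := xs.length
      if sz ≤ max_explicit_items then
        PySem.Str.join separator xs
      else
        -- str(x) on a str is x, so map(lambda x: str(x), …) is the identity map
        let rv := PySem.Str.join separator
          ((PySem.List.slice xs (some 0) (some max_explicit_items)).map (fun x => x))
        rv ++ separator ++ "and " ++ PySem.Int.toStr (sz - max_explicit_items) ++ " others"

-- ===== PORT B =====
def fmt_iterable_alt (iterable : Option (List String)) (separator : String) (max_explicit_items : Int) (if_none : String) : String :=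
  match iterable with
  | none => if_none
  | some items =>
      let hidden : Int := (items.length : Int) - max_explicit_items
      let parts : List String :=
        if 0 < hidden then
          PySem.List.slice items (some 0) (some max_explicit_items)
            ++ ["and " ++ PySem.Int.toStr hidden ++ " others"]
        else items
      PySem.Str.join separator parts

-- ===== PRECONDITION & SPEC =====
-- When the shown prefix xs[0:max_explicit_items] is empty but items are hidden (max_explicit_items = 0
-- with a nonempty list, or max_explicit_items < 0 with len ≤ -max_explicit_items) and the separator is
-- nonempty, A returns the suffix with a spurious leading separator (e.g. ', and 1 others'); B returns
-- 'and N others', which is the intended summary.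
def D_fmt_iterable (iterable : Option (List String)) (separator : String) (max_explicit_items : Int) (if_none : String) : Prop :=
  iterable ≠ none ∧ separator ≠ "" ∧
    ((max_explicit_items = 0 ∧ iterable ≠ some []) ∨
     (max_explicit_items < 0 ∧ ((iterable.getD []).length : Int) ≤ -max_explicit_items))
instance (iterable : Option (List String)) (separator : String) (max_explicit_items : Int) (if_none : String) : Decidable (D_fmt_iterable iterable separator max_explicit_items if_none) := by unfold D_fmt_iterable; infer_instance

def Spec_fmt_iterable (iterable : Option (List String)) (separator : String) (max_explicit_items : Int) (if_none : String) (out : String) : Prop := ¬ D_fmt_iterable iterable separator max_explicit_items if_none → out = fmt_iterable_alt iterable separator max_explicit_items if_none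
instance (iterable : Option (List String)) (separator : String) (max_explicit_items : Int) (if_none : String) (out : String) : Decidable (Spec_fmt_iterable iterable separator max_explicit_items if_none out) := by unfold Spec_fmt_iterable; infer_instance

def pvDiffWitness_fmt_iterable : Option (List String) × String × Int × String := (some ["a"], ", ", 0, "None")
def pvDiffWitnessOut_fmt_iterable : String × String := (", and 1 others", "and 1 others")

-- ===== CLAIM (what is proved, stated in full; the proofs are below) =====
def Claim_unchanged_fmt_iterable : Prop := ∀ (iterable : Option (List String)) (separator : String) (max_explicit_items : Int) (if_none : String), Dom_fmt_iterable iterable separator max_explicit_items if_none → Spec_fmt_iterable iterable separator max_explicit_items if_none (fmt_iterable iterable separator max_explicit_items if_none)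
def Claim_changed_fmt_iterable : Prop := Dom_fmt_iterable (pvDiffWitness_fmt_iterable.1) (pvDiffWitness_fmt_iterable.2.1) (pvDiffWitness_fmt_iterable.2.2.1) (pvDiffWitness_fmt_iterable.2.2.2) ∧ D_fmt_iterable (pvDiffWitness_fmt_iterable.1) (pvDiffWitness_fmt_iterable.2.1) (pvDiffWitness_fmt_iterable.2.2.1) (pvDiffWitness_fmt_iterable.2.2.2) ∧ fmt_iterable (pvDiffWitness_fmt_iterable.1) (pvDiffWitness_fmt_iterable.2.1) (pvDiffWitness_fmt_iterable.2.2.1) (pvDiffWitness_fmt_iterable.2.2.2) = pvDiffWitnessOut_fmt_iterable.1 ∧ fmt_iterable_alt (pvDiffWitness_fmt_iterable.1) (pvDiffWitness_fmt_iterable.2.1) (pvDiffWitness_fmt_iterable.2.2.1) (pvDiffWitness_fmt_iterable.2.2.2) = pvDiffWitnessOut_fmt_iterable.2 ∧ pvDiffWitnessOut_fmt_iterable.1 ≠ pvDiffWitnessOut_fmt_iterable.2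
def Claim_exact_fmt_iterable : Prop := ∀ (iterable : Option (List String)) (separator : String) (max_explicit_items : Int) (if_none : String), Dom_fmt_iterable iterable separator max_explicit_items if_none → D_fmt_iterable iterable separator max_explicit_items if_none → fmt_iterable iterable separator max_explicit_items if_none ≠ fmt_iterable_alt iterable separator max_explicit_items if_none

-- ===== LEMMAS AND PROOFS =====

-- joining a list with one extra element appended: the separator lands between, provided the
-- front is nonempty (or the separator is empty, when it does not matter)
lemma join_snoc (sep x : List Char) (l : List (List Char)) (h : l ≠ [] ∨ sep = []) :
    PySem.Chars.join sep (l ++ [x]) = PySem.Chars.join sep l ++ sep ++ x := by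
  induction l with
  | nil =>
      rcases h with h | h
      · exact absurd rfl h
      · simp [h, PySem.Chars.join_singleton, PySem.Chars.join_nil]
  | cons a l ih =>
      cases l with
      | nil => simp [PySem.Chars.join_cons_cons, PySem.Chars.join_singleton]
      | cons b l' =>
          simp only [List.cons_append] at ih ⊢
          rw [PySem.Chars.join_cons_cons, ih (Or.inl (by simp)),
            PySem.Chars.join_cons_cons]
          simp [List.append_assoc]

-- xs[0:m] as a take
lemma slice_zero_eq_take {α : Type} (xs : List α) (m : Int) :
    PySem.List.slice xs (some 0) (some m) = xs.take (PySem.List.clampIdx xs.length m) := by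
  simp [PySem.List.slice, PySem.List.clampIdx]

theorem fmt_iterable_spec : Claim_unchanged_fmt_iterable := by
  intro iterable separator m if_none _ hnD
  cases iterable with
  | none => rfl
  | some xs =>
      show fmt_iterable (some xs) separator m if_none = fmt_iterable_alt (some xs) separator m if_none
      by_cases hle : (xs.length : Int) ≤ m
      · have h0 : ¬ (0 : Int) < (xs.length : Int) - m := by omega
        have h0' : ¬ m < (xs.length : Int) := by omega
        simp [fmt_iterable, fmt_iterable_alt, hle, h0']
      · have h0 : (0 : Int) < (xs.length : Int) - m := by omega
        simp only [fmt_iterable, fmt_iterable_alt, if_neg hle, if_pos h0, List.map_id_fun',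
          id_eq]
        -- the front of B's parts list is nonempty outside D_ (or the separator is empty)
        have hfront : (PySem.List.slice xs (some 0) (some m)).map String.toList ≠ []
            ∨ separator.toList = [] := by
          by_cases hsep : separator = ""
          · right; simp [hsep]
          · left
            have hD' : ¬ ((m = 0 ∧ xs ≠ []) ∨ (m < 0 ∧ (xs.length : Int) ≤ -m)) := by
              intro hc
              apply hnD
              refine ⟨by simp, hsep, ?_⟩
              rcases hc with ⟨h1, h2⟩ | ⟨h1, h2⟩
              · exact Or.inl ⟨h1, by simpa using h2⟩
              · exact Or.inr ⟨h1, by simpa using h2⟩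
            obtain ⟨hz, hneg⟩ := not_or.mp hD'
            have hng : m < 0 → -m < (xs.length : Int) := by
              intro hm
              by_contra hh
              exact hneg ⟨hm, by omega⟩
            have hm0 : m = 0 → False := by
              intro hm
              subst hm
              rcases List.eq_nil_or_concat xs with h | _
              · subst h; simp at h0
              · exact hz ⟨rfl, by rintro rfl; simp at h0⟩
            have hclamp : 0 < PySem.List.clampIdx xs.length m := by
              by_cases hm : m < 0
              · have hlt := hng hm
                simp only [PySem.List.clampIdx, if_pos hm,
                  if_neg (show ¬ ((xs.length : Int) + m < 0) by omega)]
                omega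
              · have hm' : 0 < m := by
                  have hne : m ≠ 0 := fun h => hm0 h
                  omega
                simp only [PySem.List.clampIdx, if_neg hm]
                omega
            have hlenpos : 0 < xs.length := by
              by_cases hm : m < 0
              · have := hng hm; omega
              · omega
            rw [slice_zero_eq_take]
            simp only [ne_eq, List.map_eq_nil_iff, List.take_eq_nil_iff, not_or]
            exact ⟨by omega, by intro h; subst h; simp at hlenpos⟩
        apply String.toList_inj.mp
        simp only [PySem.Str.toList_join, String.toList_append, List.map_append, List.map_cons,
          List.map_nil]
        rw [join_snoc _ _ _ hfront]
        simp [List.append_assoc]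

theorem fmt_iterable_changed : Claim_changed_fmt_iterable := by
  unfold Claim_changed_fmt_iterable; decide

theorem fmt_iterable_tight : Claim_exact_fmt_iterable := by
  intro iterable separator m if_none _ hD heq
  obtain ⟨hnone, hsep, hcase⟩ := hD
  cases iterable with
  | none => exact hnone rfl
  | some xs =>
      have hlt : ¬ (xs.length : Int) ≤ m := by
        rcases hcase with ⟨hm, hxs⟩ | ⟨hm, _⟩
        · subst hm
          have hne : xs ≠ [] := by simpa using hxs
          have : 0 < xs.length := List.length_pos_iff.mpr hne
          omega
        · omega
      have h0 : (0 : Int) < (xs.length : Int) - m := by omega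
      -- inside D_ the shown prefix slice is empty
      have hempty : PySem.List.slice xs (some 0) (some m) = [] := by
        rw [slice_zero_eq_take]
        have hc : PySem.List.clampIdx xs.length m = 0 := by
          rcases hcase with ⟨hm, _⟩ | ⟨hm, hlenle⟩
          · subst hm; simp [PySem.List.clampIdx]
          · simp only [Option.getD_some] at hlenle
            simp only [PySem.List.clampIdx, if_pos hm]
            split_ifs <;> omega
        simp [hc]
      simp only [fmt_iterable, fmt_iterable_alt, if_neg hlt, if_pos h0, hempty,
        List.map_nil, List.nil_append] at heq
      have h2 := congrArg String.toList heq
      simp only [String.toList_append, PySem.Str.toList_join, List.map_nil, List.map_cons,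
        PySem.Chars.join_nil, PySem.Chars.join_singleton, List.nil_append] at h2
      have h3 := congrArg List.length h2
      simp only [List.length_append] at h3
      have h4 : separator.toList = [] := List.eq_nil_of_length_eq_zero (by omega)
      exact hsep (String.toList_inj.mp (by simp [h4]))
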